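-- pv_equiv track=rewrite | github.com/FranSollima/trust-monitor | examples/corpus_generation_pipeline.py | post_scrapp_processing_paragraph
-- ===== SOURCE A (Python) =====
-- def post_scrapp_processing_paragraph(news_list):
--
--     for news in news_list:
--
--         text_list = list(news["cuerpo"])
--
--         for i in range(len(text_list)-1):
--             if text_list[i] == "." and text_list[i+1] != " " and not (text_list[i-1].isdigit() and text_list[i+1].isdigit()) and text_list[i+1].isupper() :
--                 text_list[i] = ".\n"
--
--         news["cuerpo"] = ''. join(text_list)
--
--     return news_list
-- ===== SOURCE B (Python) =====
-- def post_scrapp_processing_paragraph(news_list):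
--     # Split each body once on '.', then rejoin the segments, inserting '.\n'
--     # before a segment that starts with an uppercase letter and '.' otherwise.
--     # Mutates each news dict in place, like the original.
--     for news in news_list:
--         parts = news["cuerpo"].split(".")
--         out = [parts[0]]
--         for p in parts[1:]:
--             out.append(".\n" if p[:1].isupper() else ".")
--             out.append(p)
--         news["cuerpo"] = "".join(out)
--     return news_list
-- ===== Notes on version B (the rewrite author's own statement) =====
-- stated objective: alternative
-- what changed: The index-based in-place character scan (with its wraparound prev access and redundant space/digit clauses, never decisive when the next char is uppercase) is replaced by a staged split/join: the body is split once on '.', and the segments are rejoined with '.\n' before a segment starting with an uppercase letter, '.' otherwise.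
import Mathlib
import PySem

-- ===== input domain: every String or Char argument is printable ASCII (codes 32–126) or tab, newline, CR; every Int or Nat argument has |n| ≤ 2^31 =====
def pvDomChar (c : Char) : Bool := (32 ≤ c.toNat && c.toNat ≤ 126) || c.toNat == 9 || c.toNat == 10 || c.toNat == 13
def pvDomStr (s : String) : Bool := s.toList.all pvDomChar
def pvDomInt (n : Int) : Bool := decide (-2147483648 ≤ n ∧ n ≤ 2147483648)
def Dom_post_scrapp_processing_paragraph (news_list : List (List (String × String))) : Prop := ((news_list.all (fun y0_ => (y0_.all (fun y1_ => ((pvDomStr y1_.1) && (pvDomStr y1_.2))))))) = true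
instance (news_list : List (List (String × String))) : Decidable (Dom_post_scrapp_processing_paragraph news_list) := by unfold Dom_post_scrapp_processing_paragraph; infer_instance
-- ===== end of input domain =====

-- B rebuilds each news body by splitting it once on '.' and rejoining the segments with
-- '.\n' before a segment that starts with an uppercase letter (alternative decomposition,
-- same cost). Both Pythons mutate the news dicts in place and return the input list; the
-- equivalence proved is about the return value.


-- ===== PORT A =====
-- Python str.isupper (no PySem primitive): at least one cased char and no lowercase one;
-- exact on the ASCII domain, where cased = alphabetic.
def pvStrIsupper (s : String) : Bool :=
  s.toList.any PySem.Chars.isalpha && s.toList.all (fun c => !(PySem.Chars.islower c))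

-- one iteration of A's inner loop; every index the loop visits is in range
-- (i-1 = -1 wraps to the last element exactly as in Python), so the getD defaults are unreachable
def pvStepA (tl : List String) (i : Int) : List String :=
  let cur := (PySem.List.pyGet? tl i).getD ""
  let nxt := (PySem.List.pyGet? tl (i+1)).getD ""
  let prv := (PySem.List.pyGet? tl (i-1)).getD ""
  if cur = "." && !(nxt = " ") && !(PySem.Str.strIsdigit prv && PySem.Str.strIsdigit nxt) && pvStrIsupper nxt
  then tl.set i.toNat ".\n" else tl

def post_scrapp_processing_paragraph (news_list : List (List (String × String))) : List (List (String × String)) :=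
  news_list.map (fun news =>
    let cuerpo := (PySem.Dict.get? (PySem.Dict.mk news) "cuerpo").getD ""  -- Pre_ rules out the KeyError
    let text_list := cuerpo.toList.map (fun c => String.ofList [c])
    let text_list := (PySem.List.pyRange 0 ((text_list.length : Int) - 1) 1).foldl pvStepA text_list
    (PySem.Dict.insert (PySem.Dict.mk news) "cuerpo" (PySem.Str.join "" text_list)).items)

-- ===== PORT B =====
-- p[:1].isupper(): true iff the piece is nonempty and its first char is uppercase (exact on ASCII)
def pvFirstUpper (p : String) : Bool :=
  match p.toList with
  | c :: _ => PySem.Chars.isupper c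
  | [] => false

def post_scrapp_processing_paragraph_alt (news_list : List (List (String × String))) : List (List (String × String)) :=
  news_list.map (fun news =>
    let s := (PySem.Dict.get? (PySem.Dict.mk news) "cuerpo").getD ""  -- Pre_ rules out the KeyError
    -- s.split(".") ported via PySem.Chars.splitOn on the code points (exact)
    let parts := (PySem.Chars.splitOn s.toList ['.']).map String.ofList
    let out := match parts with
      | [] => []  -- unreachable: str.split always returns at least one piece
      | p0 :: rest =>
          rest.foldl (fun acc p => acc ++ [(if pvFirstUpper p then ".\n" else "."), p]) [p0]
    (PySem.Dict.insert (PySem.Dict.mk news) "cuerpo" (PySem.Str.join "" out)).items)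

-- ===== PRECONDITION & SPEC =====
-- Pre_ excludes exactly the inputs on which Python A raises KeyError: a news dict without the key "cuerpo".
def Pre_post_scrapp_processing_paragraph (news_list : List (List (String × String))) : Prop :=
  ∀ news ∈ news_list, "cuerpo" ∈ news.map Prod.fst
instance (news_list : List (List (String × String))) : Decidable (Pre_post_scrapp_processing_paragraph news_list) := by unfold Pre_post_scrapp_processing_paragraph; infer_instance

def pvWitness_post_scrapp_processing_paragraph : (List (List (String × String))) :=
  [[("cuerpo", "a.Bc. d.5.6")], [("titulo", "x"), ("cuerpo", "A.B..C")]]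

def Spec_post_scrapp_processing_paragraph (news_list : List (List (String × String))) (out : List (List (String × String))) : Prop := out = post_scrapp_processing_paragraph_alt news_list
instance (news_list : List (List (String × String))) (out : List (List (String × String))) : Decidable (Spec_post_scrapp_processing_paragraph news_list out) := by unfold Spec_post_scrapp_processing_paragraph; infer_instance

-- ===== CLAIM (what is proved, stated in full; the proofs are below) =====
def Claim_equal_post_scrapp_processing_paragraph : Prop := ∀ (news_list : List (List (String × String))), Dom_post_scrapp_processing_paragraph news_list → Pre_post_scrapp_processing_paragraph news_list → Spec_post_scrapp_processing_paragraph news_list (post_scrapp_processing_paragraph news_list)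

-- ===== LEMMAS AND PROOFS =====

theorem pv_isalpha_not_isdigit (c : Char) (h : PySem.Chars.isalpha c = true) :
    PySem.Chars.isdigit c = false := by
  cases hd : PySem.Chars.isdigit c with
  | false => rfl
  | true =>
    exfalso
    simp only [PySem.Chars.isalpha, PySem.Chars.isupper, PySem.Chars.islower, PySem.Chars.isdigit,
      Bool.or_eq_true, Bool.and_eq_true, decide_eq_true_eq, Char.le_def,
      UInt32.le_iff_toNat_le] at h hd
    have e1 : ('A').val.toNat = 65 := rfl
    have e2 : ('Z').val.toNat = 90 := rfl
    have e3 : ('a').val.toNat = 97 := rfl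
    have e4 : ('z').val.toNat = 122 := rfl
    have e5 : ('0').val.toNat = 48 := rfl
    have e6 : ('9').val.toNat = 57 := rfl
    rw [e1, e2] at h; rw [e5, e6] at hd
    rcases h with ⟨h1, h2⟩ | h'
    · omega
    · rw [e3, e4] at h'; omega

theorem pv_islower_not_isupper (c : Char) (h : PySem.Chars.islower c = true) :
    PySem.Chars.isupper c = false := by
  cases hu : PySem.Chars.isupper c with
  | false => rfl
  | true =>
    exfalso
    simp only [PySem.Chars.isupper, PySem.Chars.islower, Bool.and_eq_true, decide_eq_true_eq,
      Char.le_def, UInt32.le_iff_toNat_le] at h hu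
    have e1 : ('A').val.toNat = 65 := rfl
    have e2 : ('Z').val.toNat = 90 := rfl
    have e3 : ('a').val.toNat = 97 := rfl
    rw [e3] at h; rw [e1, e2] at hu
    omega

theorem pv_strIsupper_not_digit (s : String) (h : pvStrIsupper s = true) :
    PySem.Str.strIsdigit s = false := by
  unfold pvStrIsupper at h
  rcases Bool.and_eq_true_iff.mp h with ⟨hany, -⟩
  rw [List.any_eq_true] at hany
  obtain ⟨c, hc, hca⟩ := hany
  cases hd : PySem.Str.strIsdigit s with
  | false => rfl
  | true =>
    exfalso
    simp only [PySem.Str.strIsdigit, PySem.Chars.strIsdigit, Bool.and_eq_true,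
      List.all_eq_true] at hd
    have := hd.2 c hc
    rw [pv_isalpha_not_isdigit c hca] at this
    exact Bool.false_ne_true this

theorem pv_strIsupper_ne_space (s : String) (h : pvStrIsupper s = true) : ¬ (s = " ") := by
  intro he; rw [he] at h; exact absurd h (by decide)

-- A's condition with the never-decisive clauses dropped
def pvStepA' (tl : List String) (i : Int) : List String :=
  if ((PySem.List.pyGet? tl i).getD "" = "." && pvStrIsupper ((PySem.List.pyGet? tl (i+1)).getD ""))
  then tl.set i.toNat ".\n" else tl

theorem pvStepA_eq (tl : List String) (i : Int) : pvStepA tl i = pvStepA' tl i := by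
  cases hu : pvStrIsupper ((PySem.List.pyGet? tl (i+1)).getD "") with
  | false => simp [pvStepA, pvStepA', hu]
  | true =>
    have hd : PySem.Chars.strIsdigit ((PySem.List.pyGet? tl (i+1)).getD "").toList = false :=
      pv_strIsupper_not_digit _ hu
    have hs := pv_strIsupper_ne_space _ hu
    simp [pvStepA, pvStepA', hu, hd, hs]

-- the same step, over a Nat index
def pvStepN (tl : List String) (j : Nat) : List String :=
  if (tl[j]?.getD "" = "." && pvStrIsupper (tl[j+1]?.getD "")) then tl.set j ".\n" else tl

-- structural form of A's loop
def pvZt : List String → List String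
  | a :: b :: r => (if a = "." && pvStrIsupper b then ".\n" else a) :: pvZt (b :: r)
  | l => l

theorem pvStepN_cons (x : String) (t : List String) (j : Nat) :
    pvStepN (x :: t) (j+1) = x :: pvStepN t j := by
  simp only [pvStepN, List.getElem?_cons_succ, List.set_cons_succ, apply_ite (List.cons x)]
  rfl

theorem pv_foldl_shift (js : List Nat) : ∀ (t : List String) (x : String),
    (js.map Nat.succ).foldl pvStepN (x :: t) = x :: js.foldl pvStepN t := by
  induction js with
  | nil => intro t x; rfl
  | cons j js ih =>
    intro t x
    simp only [List.map_cons, List.foldl_cons, pvStepN_cons]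
    exact ih (pvStepN t j) x

theorem pv_loopNat : ∀ (l : List String),
    (List.range (l.length - 1)).foldl pvStepN l = pvZt l := by
  intro l
  induction l with
  | nil => rfl
  | cons a t ih =>
    cases t with
    | nil => rfl
    | cons b r =>
      have hlen : (a :: b :: r).length - 1 = r.length + 1 := by simp
      rw [hlen, List.range_succ_eq_map, List.foldl_cons]
      have h0 : pvStepN (a :: b :: r) 0 =
          (if a = "." && pvStrIsupper b then ".\n" else a) :: b :: r := by
        cases hc : (decide (a = ".") && pvStrIsupper b) with
        | false => simp [pvStepN, hc]
        | true => simp [pvStepN, hc]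
      rw [h0, pv_foldl_shift]
      have ih' : (List.range ((b :: r).length - 1)).foldl pvStepN (b :: r) = pvZt (b :: r) := ih
      simp only [List.length_cons, Nat.add_sub_cancel] at ih'
      rw [ih']
      rfl

theorem pv_loop_eq (l : List String) :
    (PySem.List.pyRange 0 ((l.length : Int) - 1) 1).foldl pvStepA l = pvZt l := by
  have hstep : ∀ (acc : List String) (k : Nat), pvStepA acc (0 + (k : Int)) = pvStepN acc k := by
    intro acc k
    rw [pvStepA_eq]
    unfold pvStepA' pvStepN
    rw [← PySem.List.pyGet?_natCast acc k, ← PySem.List.pyGet?_natCast acc (k+1)]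
    simp only [zero_add, Nat.cast_add, Nat.cast_one, Int.toNat_natCast]
  rw [PySem.List.pyRange_one, List.foldl_map]
  have hn : (((l.length : Int) - 1) - 0).toNat = l.length - 1 := by omega
  rw [hn]
  simp only [hstep]
  exact pv_loopNat l

theorem pv_join0 (L : List (List Char)) : PySem.Chars.join [] L = L.flatten := by
  induction L with
  | nil => simp [PySem.Chars.join_nil]
  | cons x t ih =>
    cases t with
    | nil => simp [PySem.Chars.join_singleton]
    | cons y r =>
      rw [PySem.Chars.join_cons_cons]
      simp only [List.flatten_cons]
      rw [ih]
      simp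

theorem pv_strIsupper_single (c : Char) :
    pvStrIsupper (String.ofList [c]) = PySem.Chars.isupper c := by
  unfold pvStrIsupper
  simp only [String.toList_ofList, List.any_cons, List.any_nil, List.all_cons, List.all_nil,
    Bool.or_false, Bool.and_true, PySem.Chars.isalpha]
  cases hl : PySem.Chars.islower c with
  | false => simp
  | true => simp [pv_islower_not_isupper c hl]

theorem pv_single_eq_dot (c : Char) : (String.ofList [c] = ".") = (c = '.') := by
  apply propext; constructor
  · intro h; have := congrArg String.toList h; simpa using this
  · intro h; subst h; rfl

-- the common char-level specification: '.' becomes ".\n" when the next char is uppercase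
def pvFix : List Char → List Char
  | [] => []
  | [a] => [a]
  | a :: b :: t => (if decide (a = '.') && PySem.Chars.isupper b then ['.', '\n'] else [a]) ++ pvFix (b :: t)

theorem pvFix_cons_ne (c : Char) (t : List Char) (hc : ¬ c = '.') :
    pvFix (c :: t) = c :: pvFix t := by
  cases t with
  | nil => rfl
  | cons b r => simp [pvFix, hc]

-- A side: the structural loop over singleton strings flattens to pvFix
theorem pv_A_chars : ∀ (cs : List Char),
    ((pvZt (cs.map (fun c => String.ofList [c]))).map String.toList).flatten = pvFix cs := by
  intro cs
  induction cs with
  | nil => rfl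
  | cons a t ih =>
    cases t with
    | nil => simp [pvZt, pvFix]
    | cons b r =>
      have hzt : pvZt ((a :: b :: r).map (fun c => String.ofList [c])) =
          (if String.ofList [a] = "." && pvStrIsupper (String.ofList [b]) then ".\n"
           else String.ofList [a]) :: pvZt ((b :: r).map (fun c => String.ofList [c])) := rfl
      rw [hzt]
      have hcond : (decide (String.ofList [a] = ".") && pvStrIsupper (String.ofList [b]))
          = (decide (a = '.') && PySem.Chars.isupper b) := by
        simp only [pv_strIsupper_single, pv_single_eq_dot]
      simp only [List.map_cons, List.flatten_cons, hcond]
      have ih' : (List.map String.toList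
          (pvZt (String.ofList [b] :: List.map (fun c => String.ofList [c]) r))).flatten
          = pvFix (b :: r) := by simpa using ih
      cases hc : (decide (a = '.') && PySem.Chars.isupper b) <;>
        simp [pvFix, hc, ih']

-- B side: structural form of splitOn on sep = ['.']
def pvMsp : List Char → List Char → List (List Char)
  | [], cur => [cur.reverse]
  | c :: t, cur => if c = '.' then cur.reverse :: pvMsp t [] else pvMsp t (c :: cur)

theorem pvMsp_dot (t cur : List Char) : pvMsp ('.' :: t) cur = cur.reverse :: pvMsp t [] := by
  simp [pvMsp]

theorem pvMsp_ne (c : Char) (t cur : List Char) (hc : ¬ c = '.') :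
    pvMsp (c :: t) cur = pvMsp t (c :: cur) := by
  simp [pvMsp, hc]

theorem pv_go_eq : ∀ (l : List Char) (fuel : Nat) (cur : List Char) (acc : List (List Char)),
    l.length < fuel →
    PySem.Chars.splitOn.go ['.'] fuel l cur acc = acc.reverse ++ pvMsp l cur := by
  intro l
  induction l with
  | nil =>
    intro fuel cur acc h
    match fuel, h with
    | (f+1), _ => simp [PySem.Chars.splitOn.go, pvMsp]
  | cons c t ih =>
    intro fuel cur acc h
    match fuel, h with
    | (f+1), h =>
      have hlt : t.length < f := by simpa using h
      by_cases hc : c = '.'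
      · subst hc
        rw [PySem.Chars.splitOn.go]
        simp only [List.isPrefixOf, beq_self_eq_true, Bool.true_and]
        rw [if_pos trivial]
        rw [show List.drop ['.'].length ('.' :: t) = t from rfl]
        rw [ih f [] (cur.reverse :: acc) hlt]
        rw [pvMsp_dot]
        simp
      · rw [PySem.Chars.splitOn.go]
        have hpre : ['.'].isPrefixOf (c :: t) = false := by
          simp [List.isPrefixOf]
          exact fun h' => absurd h'.symm hc
        rw [hpre]
        simp only [Bool.false_eq_true, if_false]
        rw [ih f (c :: cur) acc hlt]
        rw [pvMsp_ne c t cur hc]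
theorem pv_splitOn_eq (cs : List Char) : PySem.Chars.splitOn cs ['.'] = pvMsp cs [] := by
  unfold PySem.Chars.splitOn
  rw [pv_go_eq cs (cs.length + 1) [] [] (by omega)]
  rfl

theorem pv_msp_head : ∀ (t cur : List Char),
    (pvMsp t cur).head? = some (cur.reverse ++ t.takeWhile (· ≠ '.')) := by
  intro t
  induction t with
  | nil => intro cur; simp [pvMsp]
  | cons c r ih =>
    intro cur
    by_cases hc : c = '.'
    · subst hc; simp [pvMsp_dot, List.takeWhile]
    · rw [pvMsp_ne c r cur hc, ih (c :: cur)]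
      simp [List.takeWhile, hc]

theorem pv_msp_ne_nil (t cur : List Char) : ∃ h0 r0, pvMsp t cur = h0 :: r0 := by
  have := pv_msp_head t cur
  cases hm : pvMsp t cur with
  | nil => rw [hm] at this; simp at this
  | cons a b => exact ⟨a, b, rfl⟩

def pvCFirstUpper : List Char → Bool
  | c :: _ => PySem.Chars.isupper c
  | [] => false

def pvGlue : List (List Char) → List Char
  | [] => []
  | p :: r => p ++ r.flatMap (fun q => (if pvCFirstUpper q then ['.', '\n'] else ['.']) ++ q)

theorem pv_glue_msp : ∀ (cs cur : List Char),
    pvGlue (pvMsp cs cur) = cur.reverse ++ pvFix cs := by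
  intro cs
  induction cs with
  | nil => intro cur; simp [pvMsp, pvGlue, pvFix]
  | cons c t ih =>
    intro cur
    by_cases hc : c = '.'
    · subst hc
      rw [pvMsp_dot]
      obtain ⟨h0, r0, hmsp⟩ := pv_msp_ne_nil t []
      have hh0 : h0 = t.takeWhile (· ≠ '.') := by
        have := pv_msp_head t []
        rw [hmsp] at this; simpa using this
      have hglue : pvGlue (cur.reverse :: pvMsp t []) =
          cur.reverse ++ ((if pvCFirstUpper h0 then ['.', '\n'] else ['.']) ++ pvGlue (pvMsp t [])) := by
        rw [hmsp]
        simp [pvGlue]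
      rw [hglue, ih []]
      have hsep : (if pvCFirstUpper h0 then ['.', '\n'] else ['.']) ++ pvFix t = pvFix ('.' :: t) := by
        cases t with
        | nil => simp [hh0, pvCFirstUpper, pvFix, List.takeWhile]
        | cons b r =>
          by_cases hb : b = '.'
          · subst hb
            have hcf : pvCFirstUpper h0 = false := by simp [hh0, List.takeWhile, pvCFirstUpper]
            rw [hcf]
            simp [pvFix, show PySem.Chars.isupper '.' = false from rfl]
          · have hcf : pvCFirstUpper h0 = PySem.Chars.isupper b := by
              simp [hh0, List.takeWhile, hb, pvCFirstUpper]
            rw [hcf]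
            simp [pvFix]
      rw [List.reverse_nil, List.nil_append, hsep]
    · rw [pvMsp_ne c t cur hc, ih (c :: cur), pvFix_cons_ne c t hc]
      simp

-- the flattened tail pieces of B's join, char-level
theorem pv_tail_chars (r0 : List (List Char)) :
    (((r0.map String.ofList).flatMap
        (fun p => [(if pvFirstUpper p then ".\n" else "."), p])).map String.toList).flatten
    = r0.flatMap (fun q => (if pvCFirstUpper q then ['.', '\n'] else ['.']) ++ q) := by
  induction r0 with
  | nil => rfl
  | cons q r ih =>
    have hfu : pvFirstUpper (String.ofList q) = pvCFirstUpper q := by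
      unfold pvFirstUpper pvCFirstUpper
      rw [String.toList_ofList]
    simp only [List.map_cons, List.flatMap_cons, List.map_append, List.flatten_append, ih, hfu]
    cases hc : pvCFirstUpper q <;> simp

-- B's body, char-level
theorem pv_B_chars (cs : List Char) :
    ((match (PySem.Chars.splitOn cs ['.']).map String.ofList with
      | [] => ([] : List String)
      | p0 :: rest =>
          rest.foldl (fun acc p => acc ++ [(if pvFirstUpper p then ".\n" else "."), p]) [p0]).map
        String.toList).flatten = pvFix cs := by
  rw [pv_splitOn_eq]
  obtain ⟨h0, r0, hmsp⟩ := pv_msp_ne_nil cs []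
  have hglue := pv_glue_msp cs []
  rw [hmsp] at hglue ⊢
  simp only [pvGlue, List.reverse_nil, List.nil_append] at hglue
  simp only [List.map_cons]
  rw [PySem.List.foldl_append_eq_flatMap, List.map_append, List.flatten_append, pv_tail_chars]
  simp only [List.map_cons, List.map_nil, List.flatten_cons, List.flatten_nil,
    String.toList_ofList, List.append_nil]
  exact hglue

theorem pv_body_eq (s : String) :
    PySem.Str.join "" ((PySem.List.pyRange 0
        (((s.toList.map (fun c => String.ofList [c])).length : Int) - 1) 1).foldl
        pvStepA (s.toList.map (fun c => String.ofList [c]))) =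
    PySem.Str.join "" (match (PySem.Chars.splitOn s.toList ['.']).map String.ofList with
      | [] => ([] : List String)
      | p0 :: rest =>
          rest.foldl (fun acc p => acc ++ [(if pvFirstUpper p then ".\n" else "."), p]) [p0]) := by
  have htl : ∀ (L : List String), (PySem.Str.join "" L).toList = (L.map String.toList).flatten := by
    intro L
    rw [PySem.Str.toList_join]
    simp only [String.toList_empty]
    exact pv_join0 _
  have h1 : (PySem.Str.join "" ((PySem.List.pyRange 0
        (((s.toList.map (fun c => String.ofList [c])).length : Int) - 1) 1).foldl
        pvStepA (s.toList.map (fun c => String.ofList [c])))).toList =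
      (PySem.Str.join "" (match (PySem.Chars.splitOn s.toList ['.']).map String.ofList with
      | [] => ([] : List String)
      | p0 :: rest =>
          rest.foldl (fun acc p => acc ++ [(if pvFirstUpper p then ".\n" else "."), p]) [p0])).toList := by
    rw [htl, htl, pv_loop_eq, pv_A_chars, pv_B_chars]
  have h2 := congrArg String.ofList h1
  rwa [String.ofList_toList, String.ofList_toList] at h2

-- ===== VERDICT (by name: the statement is the Claim_ definition above) =====
theorem post_scrapp_processing_paragraph_spec : Claim_equal_post_scrapp_processing_paragraph := by
  intro news_list _ _
  unfold Spec_post_scrapp_processing_paragraph post_scrapp_processing_paragraph post_scrapp_processing_paragraph_alt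
  refine List.map_congr_left (fun news _ => ?_)
  refine congrArg (fun v => (PySem.Dict.insert (PySem.Dict.mk news) "cuerpo" v).items) ?_
  exact pv_body_eq _
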